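-- pv_equiv track=rewrite | github.com/Alexonys1/Preporation-for-EGE | kompege.ru/Пробник 09-2022/5 (4935).py | calc
-- ===== SOURCE A (Python) =====
-- def calc(number: int) -> int:
--     bin_number = bin(number)[2:]
--
--     summ = 0
--     for num in bin_number:
--         summ += int(num)
--
--     if summ % 2:
--         bin_number = "11" + bin_number[:-2] + "11"
--     else:
--         bin_number = "10" + bin_number[:-2] + "00"
--
--     return int(bin_number, 2)
-- ===== SOURCE B (Python) =====
-- def calc(number: int) -> int:
--     # Pure integer bit arithmetic instead of building and re-parsing a binary string.
--     m = max(number.bit_length() - 2, 0)   # width of the kept middle bits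
--     mid = (number >> 2) << 2              # number with its last two bits dropped, re-shifted
--     if number.bit_count() % 2:
--         return (3 << (m + 2)) + mid + 3   # prepend '11', append '11'
--     return (2 << (m + 2)) + mid           # prepend '10', append '00'
-- ===== Notes on version B (the rewrite author's own statement) =====
-- stated objective: simpler
-- what changed: B replaces A's build-a-binary-string-and-reparse pipeline (bin(), per-character digit loop, string concatenation, int(x,2)) with closed-form integer bit arithmetic from bit_length()/bit_count() and shifts.
import Mathlib
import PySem

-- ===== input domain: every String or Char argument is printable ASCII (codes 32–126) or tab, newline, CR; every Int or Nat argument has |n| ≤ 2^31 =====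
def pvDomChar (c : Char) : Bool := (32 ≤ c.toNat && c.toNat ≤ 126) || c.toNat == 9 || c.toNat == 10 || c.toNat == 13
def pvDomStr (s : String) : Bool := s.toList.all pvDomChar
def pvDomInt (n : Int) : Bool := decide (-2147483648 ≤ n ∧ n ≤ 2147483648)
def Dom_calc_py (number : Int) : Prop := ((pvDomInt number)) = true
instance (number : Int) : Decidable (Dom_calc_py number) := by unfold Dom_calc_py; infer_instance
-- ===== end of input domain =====

-- B replaces A's build-a-binary-string-and-reparse pipeline with closed-form integer bit arithmetic.

-- ===== PORT A =====
-- bin(n)[2:] for n ≥ 0, as a list of '0'/'1' characters (hand port, exact for n ≥ 0;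
-- on negative `number` A raises ValueError inside its digit loop, excluded by Pre_).
def binChars : Nat → List Char
  | 0 => []
  | (n+1) => binChars ((n+1)/2) ++ [if (n+1) % 2 = 1 then '1' else '0']
decreasing_by exact Nat.div_lt_self (Nat.succ_pos n) (by omega)

def calc_py (number : Int) : Int :=
  -- bin_number = bin(number)[2:]   (exact for number ≥ 0, the inputs Pre_ admits)
  let bin_number : List Char := if number = 0 then ['0'] else binChars number.toNat
  -- summ: the digit loop, summ += int(num)   (int(c) ported as c.toNat - 48, exact on digit chars)
  let summ : Int := bin_number.foldl (fun s c => s + ((c.toNat : Int) - 48)) 0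
  let bin2 : List Char :=
    if PySem.Int.mod summ 2 ≠ 0 then
      ['1', '1'] ++ PySem.List.slice bin_number none (some (-2)) ++ ['1', '1']
    else
      ['1', '0'] ++ PySem.List.slice bin_number none (some (-2)) ++ ['0', '0']
  -- int(bin_number, 2): exact here since bin2 is a nonempty list of '0'/'1' digits
  bin2.foldl (fun a c => 2 * a + ((c.toNat : Int) - 48)) 0

-- ===== PORT B =====
def calc_py_alt (number : Int) : Int :=
  let m : Nat := PySem.Int.bitLength number - 2        -- max(number.bit_length() - 2, 0): Nat subtraction
  let mid : Int := (number >>> 2) <<< 2                -- (number >> 2) << 2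
  if PySem.Int.bitCount number % 2 ≠ 0 then            -- if number.bit_count() % 2:
    ((3 : Int) <<< (m + 2)) + mid + 3
  else
    ((2 : Int) <<< (m + 2)) + mid

-- ===== PRECONDITION & SPEC =====
-- A raises ValueError for negative `number` (bin gives '-0b…' and int('b') fails); Pre_ excludes exactly those.
def Pre_calc_py (number : Int) : Prop := 0 ≤ number
instance (number : Int) : Decidable (Pre_calc_py number) := by unfold Pre_calc_py; infer_instance
def pvWitness_calc_py : Int := 5

def Spec_calc_py (number : Int) (out : Int) : Prop := out = calc_py_alt number
instance (number : Int) (out : Int) : Decidable (Spec_calc_py number out) := by unfold Spec_calc_py; infer_instance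

-- ===== CLAIM (what is proved, stated in full; the proofs are below) =====
def Claim_equal_calc_py : Prop := ∀ (number : Int), Dom_calc_py number → Pre_calc_py number → Spec_calc_py number (calc_py number)

-- ===== LEMMAS AND PROOFS =====

-- the digit sum of binChars n is the popcount of n
theorem dsum_binChars (n : Nat) : ∀ (s : Int),
    (binChars n).foldl (fun s c => s + ((c.toNat : Int) - 48)) s
      = s + (PySem.Int.bitCount (n : Int) : Int) := by
  induction n using binChars.induct with
  | case1 => intro s; simp [binChars]
  | case2 n ih =>
    intro s
    rw [binChars, List.foldl_append, ih]
    rw [PySem.Int.bitCount_natCast (m := n+1) (by omega)]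
    rcases Nat.mod_two_eq_zero_or_one (n+1) with h | h <;> simp [h] <;> ring

-- the base-2 value of binChars n (folded from an arbitrary accumulator s)
theorem val_binChars (n : Nat) : ∀ (s : Int),
    (binChars n).foldl (fun a c => 2 * a + ((c.toNat : Int) - 48)) s
      = s * 2 ^ (PySem.Int.bitLength (n : Int)) + (n : Int) := by
  induction n using binChars.induct with
  | case1 => intro s; simp [binChars]
  | case2 n ih =>
    intro s
    rw [binChars, List.foldl_append, ih]
    rw [PySem.Int.bitLength_natCast (m := n+1) (by omega), pow_succ]
    rcases Nat.mod_two_eq_zero_or_one (n+1) with h | h <;> simp [h]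
    · have : (n:Int) + 1 = 2 * (((n+1)/2 : Nat) : Int) := by push_cast; omega
      ring_nf; omega
    · have : (n:Int) + 1 = 2 * (((n+1)/2 : Nat) : Int) + 1 := by push_cast; omega
      ring_nf; omega

-- dropping the last binary digit halves the number
theorem dropLast_binChars (n : Nat) : (binChars n).dropLast = binChars (n / 2) := by
  cases n with
  | zero => simp [binChars]
  | succ n => rw [binChars]; simp

-- bin_number[:-2] is the binary string of n // 4
theorem slice_binChars (n : Nat) :
    PySem.List.slice (binChars n) none (some (-2)) = binChars (n / 4) := by
  rw [PySem.List.slice_to_neg_ofNat _ 2 (by omega)]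
  have h : (binChars n).take ((binChars n).length - 2) = ((binChars n).dropLast).dropLast := by
    rw [List.dropLast_eq_take, List.dropLast_eq_take, List.take_take, List.length_take]
    congr 1
    omega
  rw [h, dropLast_binChars, dropLast_binChars, Nat.div_div_eq_div_mul]

theorem bitLength_div4 (n : Nat) :
    PySem.Int.bitLength ((n / 4 : Nat) : Int) = PySem.Int.bitLength (n : Int) - 2 := by
  have h2 : ∀ m : Nat, PySem.Int.bitLength ((m / 2 : Nat) : Int) = PySem.Int.bitLength (m : Int) - 1 := by
    intro m
    cases m with
    | zero => simp
    | succ m => rw [PySem.Int.bitLength_natCast (m := m+1) (by omega)]; omega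
  have ha := h2 n
  have hb := h2 (n / 2)
  rw [Nat.div_div_eq_div_mul] at hb
  rw [hb, ha]
  omega

-- a <<< k on Int with a Nat shift amount is multiplication by 2^k
theorem int_shiftLeft_eq (a : Int) (k : Nat) : a <<< k = a * 2 ^ k := by
  rw [← Int.shiftLeft_natCast_right, Int.shiftLeft_eq_mul_pow]; push_cast; ring

-- (n >> 2) << 2 for a natural n is (n // 4) * 4
theorem int_mid (n : Nat) : ((n : Int) >>> (2:Int)) <<< (2:Int) = ((n / 4 : Nat) : Int) * 4 := by
  have h2 : (2:Int) = ((2:Nat):Int) := rfl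
  rw [h2, Int.shiftRight_natCast, Int.shiftLeft_natCast]
  norm_num [Nat.shiftRight_eq_div_pow, Nat.shiftLeft_eq]

-- ===== VERDICT (by name: the statement is the Claim_ definition above) =====
theorem calc_py_spec : Claim_equal_calc_py := by
  intro number _ hpre
  unfold Spec_calc_py
  obtain ⟨n, rfl⟩ := Int.eq_ofNat_of_zero_le hpre
  by_cases hn : n = 0
  · subst hn; decide
  · unfold calc_py calc_py_alt
    rw [if_neg (by exact_mod_cast hn)]
    simp only [Int.toNat_natCast]
    rw [dsum_binChars n 0, zero_add]
    rw [PySem.Int.mod_eq_emod_of_pos (b := 2) (by omega)]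
    rw [int_mid]
    split_ifs with h1 h2 h2
    · simp only [slice_binChars, List.foldl_append, List.foldl_cons, List.foldl_nil]
      rw [val_binChars, bitLength_div4, int_shiftLeft_eq]
      norm_num [pow_succ]
      push_cast
      ring
    · exfalso; omega
    · exfalso; omega
    · simp only [slice_binChars, List.foldl_append, List.foldl_cons, List.foldl_nil]
      rw [val_binChars, bitLength_div4, int_shiftLeft_eq]
      norm_num [pow_succ]
      push_cast
      ring
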